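-- pv_equiv track=rewrite | github.com/MalayAgr/striver-dp-series | python/grid_unique_paths_2.py | _init_row
-- ===== SOURCE A (Python) =====
-- def _init_row(M: int, mat: list[list[int]]) -> list[int]:
--     row = []
--
--     obstacle = False
--
--     for j in range(M):
--         if obstacle is True:
--             row.append(0)
--             continue
--
--         if mat[0][j] == -1:
--             obstacle = True
--             row.append(0)
--             continue
--
--         row.append(1)
--
--     return row
-- ===== SOURCE B (Python) =====
-- def _init_row(M: int, mat: list[list[int]]) -> list[int]:
--     pos = next((j for j in range(M) if mat[0][j] == -1), M)
--     return [1] * pos + [0] * (M - pos)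
-- ===== Notes on version B (the rewrite author's own statement) =====
-- stated objective: simpler
-- what changed: Replaces the flag-carrying element-by-element append loop by finding the first obstacle index lazily and building the row in closed form as [1]*pos + [0]*(M-pos).
import Mathlib
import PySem

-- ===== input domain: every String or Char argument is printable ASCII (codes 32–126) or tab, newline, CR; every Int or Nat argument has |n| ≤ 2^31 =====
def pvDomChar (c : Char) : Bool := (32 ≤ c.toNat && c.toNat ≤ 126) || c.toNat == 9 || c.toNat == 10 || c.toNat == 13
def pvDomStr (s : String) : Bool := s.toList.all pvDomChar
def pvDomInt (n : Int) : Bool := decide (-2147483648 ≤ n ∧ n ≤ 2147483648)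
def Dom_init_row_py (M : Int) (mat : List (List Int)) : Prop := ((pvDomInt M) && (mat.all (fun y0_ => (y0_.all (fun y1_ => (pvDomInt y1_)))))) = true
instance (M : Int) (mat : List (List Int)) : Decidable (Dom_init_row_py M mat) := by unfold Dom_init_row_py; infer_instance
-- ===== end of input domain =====

-- B replaces A's flag-carrying append loop by a lazy first-obstacle search plus a
-- closed-form row [1]*pos ++ [0]*(M-pos); same values, simpler decomposition.

-- ===== PORT A =====
def init_row_py (M : Int) (mat : List (List Int)) : List Int :=
  ((PySem.List.pyRange 0 M 1).foldl
    (fun (s : List Int × Bool) j =>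
      if s.2 = true then (s.1 ++ [0], true)
      else if PySem.List.pyGetD (PySem.List.pyGetD mat 0 []) j 0 = -1 then (s.1 ++ [0], true)
      else (s.1 ++ [1], false))
    ([], false)).1

-- ===== PORT B =====
def init_row_py_alt (M : Int) (mat : List (List Int)) : List Int :=
  let pos := ((PySem.List.pyRange 0 M 1).find?
      (fun j => PySem.List.pyGetD (PySem.List.pyGetD mat 0 []) j 0 == -1)).getD M
  List.replicate pos.toNat 1 ++ List.replicate (M - pos).toNat 0

-- ===== PRECONDITION & SPEC =====
-- Pre_ excludes exactly the inputs on which A raises IndexError: a positive M with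
-- mat empty, or with mat[0] shorter than M and containing no obstacle (-1).
def Pre_init_row_py (M : Int) (mat : List (List Int)) : Prop :=
  M ≤ 0 ∨ (mat ≠ [] ∧ ((M ≤ ((mat.headD []).length : Int)) ∨ (-1 : Int) ∈ mat.headD []))
instance (M : Int) (mat : List (List Int)) : Decidable (Pre_init_row_py M mat) := by
  unfold Pre_init_row_py; infer_instance
def pvWitness_init_row_py : Int × List (List Int) := (3, [[1, -1, 1]])

def Spec_init_row_py (M : Int) (mat : List (List Int)) (out : List Int) : Prop := out = init_row_py_alt M mat
instance (M : Int) (mat : List (List Int)) (out : List Int) : Decidable (Spec_init_row_py M mat out) := by unfold Spec_init_row_py; infer_instance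

-- ===== CLAIM (what is proved, stated in full; the proofs are below) =====
def Claim_equal_init_row_py : Prop := ∀ (M : Int) (mat : List (List Int)), Dom_init_row_py M mat → Pre_init_row_py M mat → Spec_init_row_py M mat (init_row_py M mat)

-- ===== LEMMAS AND PROOFS =====

-- once the obstacle flag is set, A appends a 0 per remaining index
theorem pv_fold_true (p : Int → Bool) (l : List Int) (acc : List Int) :
    (l.foldl
      (fun (s : List Int × Bool) j =>
        if s.2 = true then (s.1 ++ [0], true)
        else if p j then (s.1 ++ [0], true)
        else (s.1 ++ [1], false))
      (acc, true)) = (acc ++ List.replicate l.length 0, true) := by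
  induction l generalizing acc with
  | nil => simp
  | cons x xs ih =>
      simp [List.foldl_cons, ih, List.replicate_succ]

-- A's loop = ones over the obstacle-free prefix, zeros from the first obstacle on
theorem pv_fold_false (p : Int → Bool) (l : List Int) (acc : List Int) :
    (l.foldl
      (fun (s : List Int × Bool) j =>
        if s.2 = true then (s.1 ++ [0], true)
        else if p j then (s.1 ++ [0], true)
        else (s.1 ++ [1], false))
      (acc, false)).1
    = acc ++ (l.takeWhile (fun j => !p j)).map (fun _ => (1 : Int))
          ++ (l.dropWhile (fun j => !p j)).map (fun _ => (0 : Int)) := by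
  induction l generalizing acc with
  | nil => simp
  | cons x xs ih =>
      by_cases hx : p x = true
      · simp [List.foldl_cons, hx, pv_fold_true, List.map_const']
      · simp only [List.foldl_cons, hx, Bool.false_eq_true, if_false]
        rw [ih]
        simp [hx]

theorem init_row_py_eq_alt (M : Int) (mat : List (List Int)) :
    init_row_py M mat = init_row_py_alt M mat := by
  set p : Int → Bool :=
    fun j => PySem.List.pyGetD (PySem.List.pyGetD mat 0 []) j 0 == -1 with hp
  have hA : init_row_py M mat
      = ((PySem.List.pyRange 0 M 1).takeWhile (fun j => !p j)).map (fun _ => (1 : Int))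
        ++ ((PySem.List.pyRange 0 M 1).dropWhile (fun j => !p j)).map (fun _ => (0 : Int)) := by
    have := pv_fold_false p (PySem.List.pyRange 0 M 1) []
    simpa [init_row_py, hp, beq_iff_eq] using this
  have hlen : (PySem.List.pyRange 0 M 1).length = M.toNat := by
    simpa using PySem.List.length_pyRange_one 0 M
  rw [hA]
  unfold init_row_py_alt
  rw [← hp]
  cases hd : (PySem.List.pyRange 0 M 1).dropWhile (fun j => !p j) with
  | nil =>
      -- no obstacle: find? = none, takeWhile = the whole range
      have ht : (PySem.List.pyRange 0 M 1).takeWhile (fun j => !p j)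
          = PySem.List.pyRange 0 M 1 := by
        have := List.takeWhile_append_dropWhile
          (p := fun j => !p j) (l := PySem.List.pyRange 0 M 1)
        rw [hd] at this; simpa using this
      have hfind : (PySem.List.pyRange 0 M 1).find? p = none := by
        rw [List.find?_eq_none]
        intro y hy
        rw [← ht] at hy
        have := List.mem_takeWhile_imp hy
        simpa using this
      simp [hfind, ht, List.map_const', hlen]
  | cons x rest =>
      set t := (PySem.List.pyRange 0 M 1).takeWhile (fun j => !p j) with htdef
      have hlx : PySem.List.pyRange 0 M 1 = t ++ x :: rest := by
        rw [htdef, ← hd]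
        exact (List.takeWhile_append_dropWhile).symm
      have hpx : p x = true := by
        have := List.head_dropWhile_not (p := fun j => !p j)
          (l := PySem.List.pyRange 0 M 1) (by simp [hd])
        simpa [hd] using this
      have hfind : (PySem.List.pyRange 0 M 1).find? p = some x := by
        rw [hlx, List.find?_append]
        have : t.find? p = none := by
          rw [List.find?_eq_none]
          intro y hy
          have := List.mem_takeWhile_imp (htdef ▸ hy)
          simpa using this
        simp [this, hpx]
      have hlt : t.length < (PySem.List.pyRange 0 M 1).length := by
        rw [hlx]; simp
      have hxval : x = (t.length : Int) := by
        have h1 := PySem.List.getElem_pyRange_one (a := 0) (b := M) (k := t.length)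
          (h := by simpa using hlt)
        rw [List.getElem_of_eq hlx] at h1
        simp only [List.getElem_append_right (Nat.le_refl t.length), Nat.sub_self,
          List.getElem_cons_zero] at h1
        omega
      have hlsum : t.length + (rest.length + 1) = M.toNat := by
        have h := congrArg List.length hlx
        simp only [List.length_append, List.length_cons] at h
        omega
      simp only [hfind, Option.getD_some, List.map_cons, List.map_const']
      have h1 : x.toNat = t.length := by omega
      have h2 : (M - x).toNat = rest.length + 1 := by omega
      rw [h1, h2, List.replicate_succ]

-- ===== VERDICT (by name: the statement is the Claim_ definition above) =====
theorem init_row_py_spec : Claim_equal_init_row_py := by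
  intro M mat _ _
  unfold Spec_init_row_py
  exact init_row_py_eq_alt M mat
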